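-- pv_equiv track=rewrite | github.com/LenzGit/OpenAniMusic | gui/detect_and_copy_staff_lines.py | merge_lines_connect
-- ===== SOURCE A (Python) =====
-- def compute_overlap(interval1, interval2):
--     """
--     interval1 = (x_start1, x_end1)
--     interval2 = (x_start2, x_end2)
--     Returns the number of overlapping pixels in the X direction (>= 0).
--     """
--     (s1, e1) = interval1
--     (s2, e2) = interval2
--     start = max(s1, s2)
--     end = min(e1, e2)
--     return max(0, end - start + 1)
--
-- def can_connect(lineA, lineB, min_overlap_pixels=5):
--     """
--     lineA, lineB = (y, x_start, x_end)
--     Checks whether: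
--       1) |yA - yB| <= 1
--       2) x-ranges overlap at least 'min_overlap_pixels'
--     Returns True if lineA can connect directly to lineB.
--     """
--     (yA, xA_start, xA_end) = lineA
--     (yB, xB_start, xB_end) = lineB
--     if abs(yA - yB) > 1:
--         return False
--     overlap = compute_overlap((xA_start, xA_end), (xB_start, xB_end))
--     if overlap < min_overlap_pixels:
--         return False
--     return True
--
-- def can_merge_with_group(new_line, group_lines, min_overlap_pixels=5):
--     """
--     new_line = (y, x_start, x_end)
--     group_lines = List of lines [(y1, xs1, xe1), (y2, xs2, xe2), ...]
--     Checks whether 'new_line' can connect to at least one line in group_lines.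
--     """
--     for line in group_lines:
--         if can_connect(new_line, line, min_overlap_pixels):
--             return True
--     return False
--
-- def merge_lines_connect(segments, min_overlap_pixels=5):
--     """
--     Builds groups by having each line either
--     joining an existing group (if can_merge_with_group==True)
--     or forming a new group.
--     """
--     groups = []
--     for line in segments:
--         found_group = None
--         for g in groups:
--             if can_merge_with_group(line, g, min_overlap_pixels):
--                 g.append(line)
--                 found_group = g
--                 break
--         if found_group is None:
--             groups.append([line])
--     return groups
-- ===== SOURCE B (Python) =====
-- def merge_lines_connect(segments, min_overlap_pixels=5):
--     """Flat single-pass group-id assignment: tag each line with the minimal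
--     connectable group id (or a fresh one), then bucket lines by id at the end."""
--     assigned = []  # list of (line, group_id) in input order
--     ngroups = 0
--     for line in segments:
--         y, s, e = line
--         best = None
--         for prev, gid in assigned:
--             py, ps, pe = prev
--             if abs(y - py) <= 1 and max(0, min(e, pe) - max(s, ps) + 1) >= min_overlap_pixels:
--                 if best is None or gid < best:
--                     best = gid
--         if best is None:
--             best = ngroups
--             ngroups += 1
--         assigned.append((line, best))
--     return [[ln for (ln, g) in assigned if g == i] for i in range(ngroups)]
-- ===== Notes on version B (the rewrite author's own statement) =====
-- stated objective: alternative
-- what changed: Replaces A's nested loop that scans the mutable list of groups and appends the line to the first connectable group by a flat single pass that tags each line with the minimal connectable group id over previously assigned lines (one inline comparison, no per-pair helper-function calls), then buckets the lines by id at the end.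
import Mathlib
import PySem

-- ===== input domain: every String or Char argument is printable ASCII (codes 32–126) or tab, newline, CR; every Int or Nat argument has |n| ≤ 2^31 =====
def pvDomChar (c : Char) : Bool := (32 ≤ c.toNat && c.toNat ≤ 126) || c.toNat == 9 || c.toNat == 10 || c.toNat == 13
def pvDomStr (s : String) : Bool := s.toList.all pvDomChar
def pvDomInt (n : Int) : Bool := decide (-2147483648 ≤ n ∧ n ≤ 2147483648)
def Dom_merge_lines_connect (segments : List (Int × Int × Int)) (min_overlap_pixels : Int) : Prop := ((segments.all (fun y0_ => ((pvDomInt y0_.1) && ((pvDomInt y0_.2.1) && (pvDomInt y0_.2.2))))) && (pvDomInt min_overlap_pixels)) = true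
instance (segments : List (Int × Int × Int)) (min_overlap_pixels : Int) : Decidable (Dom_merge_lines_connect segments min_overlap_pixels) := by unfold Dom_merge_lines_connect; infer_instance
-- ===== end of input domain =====

-- B replaces A's nested mutate-first-matching-group loop by a flat single pass that tags each
-- line with the minimal connectable group id and buckets the lines by id at the end (alternative
-- decomposition, same asymptotic cost).


-- ===== PORT A =====
-- compute_overlap
def pvOverlapA (i1 i2 : Int × Int) : Int :=
  max 0 (min i1.2 i2.2 - max i1.1 i2.1 + 1)

-- can_connect
def pvCanConnectA (a b : Int × Int × Int) (m : Int) : Bool :=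
  if 1 < |a.1 - b.1| then false
  else if pvOverlapA (a.2.1, a.2.2) (b.2.1, b.2.2) < m then false
  else true

-- can_merge_with_group: scan the group, early-return on the first connectable member
def pvCanMergeGroupA (line : Int × Int × Int) (g : List (Int × Int × Int)) (m : Int) : Bool :=
  g.any (fun l => pvCanConnectA line l m)

-- the inner 'for g in groups' loop: append line to the first matching group (none if no match)
def pvTryInsertA (line : Int × Int × Int) (m : Int) :
    List (List (Int × Int × Int)) → Option (List (List (Int × Int × Int)))
  | [] => none
  | g :: rest =>
    if pvCanMergeGroupA line g m then some ((g ++ [line]) :: rest)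
    else (pvTryInsertA line m rest).map (g :: ·)

def pvStepA (m : Int) (groups : List (List (Int × Int × Int))) (line : Int × Int × Int) :
    List (List (Int × Int × Int)) :=
  match pvTryInsertA line m groups with
  | some gs => gs
  | none => groups ++ [[line]]

def merge_lines_connect (segments : List (Int × Int × Int)) (min_overlap_pixels : Int) :
    List (List (Int × Int × Int)) :=
  segments.foldl (pvStepA min_overlap_pixels) []

-- ===== PORT B =====
-- the inline connectability test of Source B
def pvConnB (line prev : Int × Int × Int) (m : Int) : Bool :=
  |line.1 - prev.1| ≤ 1 && m ≤ max 0 (min line.2.2 prev.2.2 - max line.2.1 prev.2.1 + 1)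

-- the inner loop of Source B: minimal group id among connectable previously assigned lines
def pvBestB (line : Int × Int × Int) (m : Int) (assigned : List ((Int × Int × Int) × Nat)) :
    Option Nat :=
  assigned.foldl (fun best pg =>
    if pvConnB line pg.1 m then
      match best with
      | none => some pg.2
      | some b => if pg.2 < b then some pg.2 else some b
    else best) none

def pvStepB (m : Int) (st : List ((Int × Int × Int) × Nat) × Nat) (line : Int × Int × Int) :
    List ((Int × Int × Int) × Nat) × Nat :=
  match pvBestB line m st.1 with
  | some b => (st.1 ++ [(line, b)], st.2)
  | none => (st.1 ++ [(line, st.2)], st.2 + 1)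

-- '[ln for (ln, g) in assigned if g == i]'
def pvBucket (assigned : List ((Int × Int × Int) × Nat)) (i : Nat) : List (Int × Int × Int) :=
  (assigned.filter (fun p => p.2 == i)).map Prod.fst

-- the final bucketing comprehension over range(ngroups)
def pvBuckets (assigned : List ((Int × Int × Int) × Nat)) (n : Nat) :
    List (List (Int × Int × Int)) :=
  (List.range n).map (pvBucket assigned)

def merge_lines_connect_alt (segments : List (Int × Int × Int)) (min_overlap_pixels : Int) :
    List (List (Int × Int × Int)) :=
  let st := segments.foldl (pvStepB min_overlap_pixels) ([], 0)
  pvBuckets st.1 st.2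

-- ===== PRECONDITION & SPEC =====
def Spec_merge_lines_connect (segments : List (Int × Int × Int)) (min_overlap_pixels : Int) (out : List (List (Int × Int × Int))) : Prop := out = merge_lines_connect_alt segments min_overlap_pixels
instance (segments : List (Int × Int × Int)) (min_overlap_pixels : Int) (out : List (List (Int × Int × Int))) : Decidable (Spec_merge_lines_connect segments min_overlap_pixels out) := by unfold Spec_merge_lines_connect; infer_instance

-- ===== CLAIM (what is proved, stated in full; the proofs are below) =====
def Claim_equal_merge_lines_connect : Prop := ∀ (segments : List (Int × Int × Int)) (min_overlap_pixels : Int), Dom_merge_lines_connect segments min_overlap_pixels → Spec_merge_lines_connect segments min_overlap_pixels (merge_lines_connect segments min_overlap_pixels)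

-- ===== LEMMAS AND PROOFS =====

-- the two connectability tests agree
theorem pvConn_eq (a b : Int × Int × Int) (m : Int) :
    pvCanConnectA a b m = pvConnB a b m := by
  simp only [pvCanConnectA, pvConnB, pvOverlapA]
  split_ifs with h1 h2
  all_goals simp_all
  all_goals omega

-- a bucket matches iff some assigned pair with that id connects
theorem pvBucket_match (line : Int × Int × Int) (m : Int)
    (a : List ((Int × Int × Int) × Nat)) (i : Nat) :
    pvCanMergeGroupA line (pvBucket a i) m = true ↔
      ∃ p ∈ a, pvConnB line p.1 m = true ∧ p.2 = i := by
  simp only [pvCanMergeGroupA, pvBucket, List.any_eq_true, List.mem_map, List.mem_filter]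
  constructor
  · rintro ⟨l, ⟨p, ⟨hp, hi⟩, rfl⟩, hc⟩
    exact ⟨p, hp, by rwa [pvConn_eq] at hc, by simpa using hi⟩
  · rintro ⟨p, hp, hc, hi⟩
    exact ⟨p.1, ⟨p, ⟨hp, by simp [hi]⟩, rfl⟩, by rwa [pvConn_eq]⟩

theorem pvTryInsertA_eq_none (line : Int × Int × Int) (m : Int)
    (gs : List (List (Int × Int × Int))) :
    (∀ g ∈ gs, pvCanMergeGroupA line g m = false) → pvTryInsertA line m gs = none := by
  induction gs with
  | nil => intro _; rfl
  | cons g rest ih =>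
    intro h
    simp only [pvTryInsertA, h g (by simp), Bool.false_eq_true, if_false,
      ih (fun g' hg' => h g' (by simp [hg']))]
    rfl

theorem pvTryInsertA_eq_some (line : Int × Int × Int) (m : Int)
    (gs : List (List (Int × Int × Int))) (k : Nat) (hk : k < gs.length)
    (hmatch : pvCanMergeGroupA line gs[k] m = true)
    (hbefore : ∀ j, (hj : j < k) → pvCanMergeGroupA line (gs[j]'(by omega)) m = false) :
    pvTryInsertA line m gs = some (gs.set k (gs[k] ++ [line])) := by
  induction gs generalizing k with
  | nil => simp at hk
  | cons g rest ih =>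
    cases k with
    | zero => simp only [pvTryInsertA, List.getElem_cons_zero] at hmatch ⊢
              simp [hmatch]
    | succ k' =>
      have h0 : pvCanMergeGroupA line g m = false := by
        have := hbefore 0 (Nat.succ_pos _); simpa using this
      simp only [pvTryInsertA, h0, Bool.false_eq_true, if_false]
      rw [ih k' (by simpa using hk) (by simpa using hmatch)
        (fun j hj => by have := hbefore (j+1) (by omega); simpa using this)]
      simp

-- pvBestB computes the minimum of the connectable group ids
theorem pvBestB_aux_some (line : Int × Int × Int) (m : Int)
    (a : List ((Int × Int × Int) × Nat)) (b : Nat) :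
    a.foldl (fun best pg =>
      if pvConnB line pg.1 m then
        match best with
        | none => some pg.2
        | some b => if pg.2 < b then some pg.2 else some b
      else best) (some b)
    = some (((a.filter (fun p => pvConnB line p.1 m)).map Prod.snd).foldl min b) := by
  induction a generalizing b with
  | nil => rfl
  | cons p rest ih =>
    by_cases hc : pvConnB line p.1 m = true
    · rw [List.foldl_cons, List.filter_cons_of_pos (by simpa using hc), List.map_cons,
        List.foldl_cons]
      simp only [hc, if_true]
      have hmin : (if p.2 < b then some p.2 else some b) = some (min b p.2) := by
        split_ifs with h
        · simp [min_def]; omega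
        · simp [min_def]; omega
      rw [hmin, ih]
    · rw [List.foldl_cons, List.filter_cons_of_neg (by simpa using hc)]
      simp only [hc, Bool.false_eq_true, if_false]
      exact ih b

theorem pvBestB_eq_min? (line : Int × Int × Int) (m : Int)
    (a : List ((Int × Int × Int) × Nat)) :
    pvBestB line m a = ((a.filter (fun p => pvConnB line p.1 m)).map Prod.snd).min? := by
  unfold pvBestB
  induction a with
  | nil => rfl
  | cons p rest ih =>
    by_cases hc : pvConnB line p.1 m = true
    · rw [List.foldl_cons, List.filter_cons_of_pos (by simpa using hc), List.map_cons,
        List.min?_cons']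
      simp only [hc, if_true]
      exact pvBestB_aux_some line m rest p.2
    · rw [List.foldl_cons, List.filter_cons_of_neg (by simpa using hc)]
      simp only [hc, Bool.false_eq_true, if_false]
      exact ih

theorem pvBestB_none (line : Int × Int × Int) (m : Int)
    (a : List ((Int × Int × Int) × Nat)) (h : pvBestB line m a = none) :
    ∀ p ∈ a, pvConnB line p.1 m = false := by
  rw [pvBestB_eq_min?, List.min?_eq_none_iff, List.map_eq_nil_iff,
    List.filter_eq_nil_iff] at h
  intro p hp
  simpa using h p hp

theorem pvBestB_some (line : Int × Int × Int) (m : Int)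
    (a : List ((Int × Int × Int) × Nat)) (b : Nat) (h : pvBestB line m a = some b) :
    (∃ p ∈ a, pvConnB line p.1 m = true ∧ p.2 = b) ∧
      (∀ p ∈ a, pvConnB line p.1 m = true → b ≤ p.2) := by
  rw [pvBestB_eq_min?, List.min?_eq_some_iff] at h
  obtain ⟨hmem, hle⟩ := h
  constructor
  · rw [List.mem_map] at hmem
    obtain ⟨q, hq, hqb⟩ := hmem
    rw [List.mem_filter] at hq
    exact ⟨q, hq.1, hq.2, hqb⟩
  · intro p hp hc
    exact hle p.2 (by simp only [List.mem_map, List.mem_filter]; exact ⟨p, ⟨hp, hc⟩, rfl⟩)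

-- bucket after appending one assignment
theorem pvBucket_append (a : List ((Int × Int × Int) × Nat)) (line : Int × Int × Int)
    (b i : Nat) :
    pvBucket (a ++ [(line, b)]) i = pvBucket a i ++ (if b = i then [line] else []) := by
  simp only [pvBucket, List.filter_append, List.map_append]
  congr 1
  by_cases h : b = i
  · subst h; simp [List.filter]
  · have hbi : (b == i) = false := by simp [h]
    simp [List.filter, hbi, h]

-- one step of A on the bucket view equals one step of B, bucketed
theorem pvStep_eq (m : Int) (line : Int × Int × Int)
    (a : List ((Int × Int × Int) × Nat)) (n : Nat) (hb : ∀ p ∈ a, p.2 < n) :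
    pvStepA m (pvBuckets a n) line
      = pvBuckets (pvStepB m (a, n) line).1 (pvStepB m (a, n) line).2 ∧
    ∀ p ∈ (pvStepB m (a, n) line).1, p.2 < (pvStepB m (a, n) line).2 := by
  cases hbest : pvBestB line m a with
  | none =>
    have hno := pvBestB_none line m a hbest
    have hnone : pvTryInsertA line m (pvBuckets a n) = none := by
      apply pvTryInsertA_eq_none
      intro g hg
      obtain ⟨i, _, rfl⟩ := by simpa [pvBuckets, List.mem_map, List.mem_range] using hg
      rw [Bool.eq_false_iff]
      intro hmatch
      obtain ⟨p, hp, hc, _⟩ := (pvBucket_match line m a i).mp hmatch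
      simp [hno p hp] at hc
    refine ⟨?_, ?_⟩
    · simp only [pvStepA, pvStepB, hbest, hnone]
      simp only [pvBuckets, List.range_succ, List.map_append, List.map_cons, List.map_nil]
      congr 1
      · apply List.map_congr_left
        intro i hi
        rw [pvBucket_append]
        have : ¬ n = i := by simp at hi; omega
        simp [this]
      · rw [pvBucket_append]
        have : pvBucket a n = [] := by
          simp only [pvBucket, List.map_eq_nil_iff, List.filter_eq_nil_iff]
          intro p hp
          have := hb p hp
          simp; omega
        simp [this]
    · simp only [pvStepB, hbest]
      intro p hp
      rcases List.mem_append.mp hp with h | h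
      · have := hb p h; omega
      · rw [List.mem_singleton] at h; subst h; simp
  | some b =>
    obtain ⟨⟨p0, hp0, hc0, hb0⟩, hmin⟩ := pvBestB_some line m a b hbest
    have hbn : b < n := hb0 ▸ hb p0 hp0
    have hsome : pvTryInsertA line m (pvBuckets a n)
        = some ((pvBuckets a n).set b (pvBucket a b ++ [line])) := by
      have hlen : b < (pvBuckets a n).length := by simpa [pvBuckets] using hbn
      have hget : (pvBuckets a n)[b] = pvBucket a b := by
        simp [pvBuckets]
      rw [pvTryInsertA_eq_some line m _ b hlen]
      · rw [hget]
      · rw [hget]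
        exact (pvBucket_match line m a b).mpr ⟨p0, hp0, hc0, hb0⟩
      · intro j hj
        have hjn : j < n := by omega
        have hgj : (pvBuckets a n)[j]'(by simpa [pvBuckets] using hjn) = pvBucket a j := by
          simp [pvBuckets]
        rw [hgj, Bool.eq_false_iff]
        intro hmatch
        obtain ⟨p, hp, hc, hpj⟩ := (pvBucket_match line m a j).mp hmatch
        have := hmin p hp hc
        omega
    refine ⟨?_, ?_⟩
    · simp only [pvStepA, pvStepB, hbest, hsome]
      apply List.ext_getElem
      · simp [pvBuckets]
      · intro i hi1 hi2
        have hin : i < n := by simpa [pvBuckets] using hi2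
        rw [List.getElem_set]
        by_cases hbi : b = i
        · subst hbi
          simp [pvBuckets, pvBucket_append]
        · have : (pvBuckets a n)[i]'(by simpa [pvBuckets] using hin) = pvBucket a i := by
            simp [pvBuckets]
          rw [if_neg hbi, this]
          simp only [pvBuckets, List.getElem_map, List.getElem_range, pvBucket_append,
            if_neg hbi, List.append_nil]
    · simp only [pvStepB, hbest]
      intro p hp
      rcases List.mem_append.mp hp with h | h
      · exact hb p h
      · rw [List.mem_singleton] at h; subst h; simpa using hbn

theorem pvFold_eq (m : Int) (segs : List (Int × Int × Int))
    (a : List ((Int × Int × Int) × Nat)) (n : Nat) (hb : ∀ p ∈ a, p.2 < n) :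
    segs.foldl (pvStepA m) (pvBuckets a n)
      = pvBuckets (segs.foldl (pvStepB m) (a, n)).1 (segs.foldl (pvStepB m) (a, n)).2 := by
  induction segs generalizing a n with
  | nil => rfl
  | cons line rest ih =>
    obtain ⟨heq, hb'⟩ := pvStep_eq m line a n hb
    simp only [List.foldl_cons, heq]
    exact ih (pvStepB m (a, n) line).1 (pvStepB m (a, n) line).2 hb'

-- ===== VERDICT (by name: the statement is the Claim_ definition above) =====
theorem merge_lines_connect_spec : Claim_equal_merge_lines_connect := by
  intro segments m _
  unfold Spec_merge_lines_connect merge_lines_connect merge_lines_connect_alt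
  have h0 : (([] : List (List (Int × Int × Int)))) = pvBuckets [] 0 := by rfl
  rw [h0, pvFold_eq m segments [] 0 (by simp)]
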